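-- pv_equiv track=rewrite | github.com/quepas/advent-of-code | 2023/18/run.py | divide_row_into_segments
-- ===== SOURCE A (Python) =====
-- Hole = tuple[int, int]
--
-- def divide_row_into_segments(holes: list[Hole]) -> list[list[Hole]]:
--     segments = []
--     current = []
--     for hole in holes:
--         if not current:
--             current.append(hole)
--             continue
--         distance = hole[1] - current[-1][1]
--         if distance == 1:
--             current.append(hole)
--         else:
--             segments.append(current)
--             current = [hole]
--     if current:
--         segments.append(current)
--     return segments
-- ===== SOURCE B (Python) =====
-- Hole = tuple[int, int]
--
-- def divide_row_into_segments(holes: list[Hole]) -> list[list[Hole]]: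
--     n = len(holes)
--     segments = []
--     i = 0
--     while i < n:
--         j = i + 1
--         while j < n and holes[j][1] - holes[j - 1][1] == 1:
--             j += 1
--         segments.append(holes[i:j])
--         i = j
--     return segments
-- ===== Notes on version B (the rewrite author's own statement) =====
-- stated objective: alternative
-- what changed: Replaces A's element-by-element accumulator (current/segments lists with append and flush) by a two-pointer scan: an inner loop finds the end of each consecutive-column run and the whole run is emitted as one slice holes[i:j].
import Mathlib
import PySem

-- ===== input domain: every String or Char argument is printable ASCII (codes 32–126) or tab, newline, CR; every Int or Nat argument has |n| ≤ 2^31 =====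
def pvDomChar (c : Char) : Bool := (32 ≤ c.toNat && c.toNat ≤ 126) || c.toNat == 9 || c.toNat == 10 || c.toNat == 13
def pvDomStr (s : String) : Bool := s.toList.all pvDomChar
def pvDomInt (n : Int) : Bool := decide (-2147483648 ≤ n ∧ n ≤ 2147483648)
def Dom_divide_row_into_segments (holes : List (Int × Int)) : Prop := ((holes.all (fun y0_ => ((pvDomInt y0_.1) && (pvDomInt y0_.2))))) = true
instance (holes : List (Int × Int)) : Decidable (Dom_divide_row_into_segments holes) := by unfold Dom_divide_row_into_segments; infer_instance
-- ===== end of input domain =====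

-- B replaces A's element-by-element accumulator by a two-pointer index scan emitting each run as one slice (alternative decomposition, same cost).

-- ===== PORT A =====
def divide_row_into_segments (holes : List (Int × Int)) : List (List (Int × Int)) :=
  let st := holes.foldl
    (fun (st : List (List (Int × Int)) × List (Int × Int)) hole =>
      let segments := st.1
      let current := st.2
      if current.isEmpty then (segments, current ++ [hole])
      else
        let distance := hole.2 - current.getLast!.2
        if distance = 1 then (segments, current ++ [hole])
        else (segments ++ [current], [hole]))
    ([], [])
  if st.2.isEmpty then st.1 else st.1 ++ [st.2]

-- ===== PORT B =====
-- inner while loop of Source B: advance j while j < n and holes[j][1] - holes[j-1][1] == 1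
def pvRunEnd (holes : List (Int × Int)) (n j : Nat) : Nat :=
  if _h : j < n then
    if (holes.getD j (0, 0)).2 - (holes.getD (j - 1) (0, 0)).2 = 1 then
      pvRunEnd holes n (j + 1)
    else j
  else j
termination_by n - j

-- needed by pvSegsFrom's termination: the inner scan never moves backwards
theorem pvRunEnd_ge (holes : List (Int × Int)) (n j : Nat) : j ≤ pvRunEnd holes n j := by
  unfold pvRunEnd
  split
  · split
    · exact le_trans (Nat.le_succ j) (pvRunEnd_ge holes n (j + 1))
    · exact le_refl j
  · exact le_refl j
termination_by n - j

-- outer while loop of Source B; holes[i:j] with i ≤ j ≤ n is (holes.drop i).take (j - i)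
def pvSegsFrom (holes : List (Int × Int)) (n i : Nat) (segments : List (List (Int × Int))) :
    List (List (Int × Int)) :=
  if _h : i < n then
    let j := pvRunEnd holes n (i + 1)
    pvSegsFrom holes n j (segments ++ [(holes.drop i).take (j - i)])
  else segments
termination_by n - i
decreasing_by
  have := pvRunEnd_ge holes n (i + 1)
  omega

def divide_row_into_segments_alt (holes : List (Int × Int)) : List (List (Int × Int)) :=
  pvSegsFrom holes holes.length 0 []

-- ===== PRECONDITION & SPEC =====
def Spec_divide_row_into_segments (holes : List (Int × Int)) (out : List (List (Int × Int))) : Prop := out = divide_row_into_segments_alt holes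
instance (holes : List (Int × Int)) (out : List (List (Int × Int))) : Decidable (Spec_divide_row_into_segments holes out) := by unfold Spec_divide_row_into_segments; infer_instance

-- ===== CLAIM (what is proved, stated in full; the proofs are below) =====
def Claim_equal_divide_row_into_segments : Prop := ∀ (holes : List (Int × Int)), Dom_divide_row_into_segments holes → Spec_divide_row_into_segments holes (divide_row_into_segments holes)

-- ===== LEMMAS AND PROOFS =====

-- length of the initial run continuing column `prev`
def pvRl (prev : Int) : List (Int × Int) → Nat
  | [] => 0
  | h :: t => if h.2 - prev = 1 then 1 + pvRl h.2 t else 0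

-- reference characterization of the segments, recursively
def pvC : List (Int × Int) → List (List (Int × Int))
  | [] => []
  | h :: t => (h :: t.take (pvRl h.2 t)) :: pvC (t.drop (pvRl h.2 t))
termination_by l => l.length
decreasing_by simp

theorem pvC_nil : pvC [] = [] := by simp [pvC]

theorem pvC_cons (h : Int × Int) (t : List (Int × Int)) :
    pvC (h :: t) = (h :: t.take (pvRl h.2 t)) :: pvC (t.drop (pvRl h.2 t)) := by
  simp [pvC]

-- proof-side name for A's loop body
def pvStep (st : List (List (Int × Int)) × List (Int × Int)) (hole : Int × Int) :
    List (List (Int × Int)) × List (Int × Int) :=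
  if st.2.isEmpty then (st.1, st.2 ++ [hole])
  else if hole.2 - st.2.getLast!.2 = 1 then (st.1, st.2 ++ [hole])
  else (st.1 ++ [st.2], [hole])

theorem getLast!_eq_getD (l : List (Int × Int)) : l.getLast! = l.getLast?.getD default := by
  cases l with
  | nil => rfl
  | cons x xs => simp [List.getLast!, List.getLast?_eq_some_getLast]

theorem getLast!_append_singleton (l : List (Int × Int)) (a : Int × Int) :
    (l ++ [a]).getLast! = a := by
  rw [getLast!_eq_getD]; simp

-- A's fold after the first element, with `current` nonempty and last column `prev`
def pvG (prev : Int) (cur : List (Int × Int)) : List (Int × Int) → List (List (Int × Int))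
  | [] => [cur]
  | h :: t => if h.2 - prev = 1 then pvG h.2 (cur ++ [h]) t else cur :: pvG h.2 [h] t

theorem foldA_eq_pvG (rest : List (Int × Int)) :
    ∀ (segs : List (List (Int × Int))) (cur : List (Int × Int)) (prev : Int),
      cur ≠ [] → cur.getLast!.2 = prev →
      (let st := rest.foldl pvStep (segs, cur)
       if st.2.isEmpty then st.1 else st.1 ++ [st.2]) = segs ++ pvG prev cur rest := by
  induction rest with
  | nil =>
      intro segs cur prev hne _
      simp [pvG, hne]
  | cons h t ih =>
      intro segs cur prev hne hlast
      have hstep : pvStep (segs, cur) h =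
          if h.2 - prev = 1 then (segs, cur ++ [h]) else (segs ++ [cur], [h]) := by
        have hie : cur.isEmpty = false := by simp [hne]
        simp only [pvStep, hie, Bool.false_eq_true, if_false, hlast]
      rw [List.foldl_cons, hstep]
      by_cases hd : h.2 - prev = 1
      · rw [if_pos hd]
        simp only [pvG, if_pos hd]
        exact ih segs (cur ++ [h]) h.2 (by simp)
          (by rw [getLast!_append_singleton])
      · rw [if_neg hd]
        simp only [pvG, if_neg hd]
        rw [ih (segs ++ [cur]) [h] h.2 (by simp) (by rw [getLast!_eq_getD]; simp)]
        simp

theorem pvG_eq_pvC (rest : List (Int × Int)) :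
    ∀ (prev : Int) (cur : List (Int × Int)),
      pvG prev cur rest
        = (cur ++ rest.take (pvRl prev rest)) :: pvC (rest.drop (pvRl prev rest)) := by
  induction rest with
  | nil => intro prev cur; simp [pvG, pvRl, pvC_nil]
  | cons h t ih =>
      intro prev cur
      by_cases hd : h.2 - prev = 1
      · simp only [pvG, pvRl, if_pos hd]
        rw [ih h.2 (cur ++ [h])]
        simp [Nat.add_comm 1 (pvRl h.2 t), List.take_succ_cons, List.drop_succ_cons]
      · simp only [pvG, pvRl, if_neg hd]
        rw [ih h.2 [h]]
        simp [pvC_cons]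
theorem portA_eq_pvC (holes : List (Int × Int)) :
    divide_row_into_segments holes = pvC holes := by
  show (let st := holes.foldl pvStep ([], [])
        if st.2.isEmpty then st.1 else st.1 ++ [st.2]) = pvC holes
  cases holes with
  | nil => simp [pvC_nil]
  | cons h t =>
      have hstep0 : pvStep ([], []) h = ([], [h]) := rfl
      rw [List.foldl_cons, hstep0,
        foldA_eq_pvG t [] [h] h.2 (by simp) (by rw [getLast!_eq_getD]; simp),
        pvG_eq_pvC, pvC_cons]
      simp

theorem pvRunEnd_eq (holes : List (Int × Int)) (j : Nat) :
    pvRunEnd holes holes.length j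
      = j + pvRl (holes.getD (j - 1) (0, 0)).2 (holes.drop j) := by
  unfold pvRunEnd
  by_cases h : j < holes.length
  · rw [dif_pos h]
    have hg : holes.getD j (0, 0) = holes[j] := List.getD_eq_getElem holes (0, 0) h
    have hdrop : holes.drop j = holes[j] :: holes.drop (j + 1) := List.drop_eq_getElem_cons h
    rw [hdrop, hg]
    by_cases hc : (holes[j]).2 - (holes.getD (j - 1) (0, 0)).2 = 1
    · rw [if_pos hc, pvRunEnd_eq holes (j + 1)]
      have hj1 : j + 1 - 1 = j := by omega
      rw [hj1, hg]
      simp only [pvRl, if_pos hc]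
      omega
    · rw [if_neg hc]
      simp only [pvRl, if_neg hc]
      omega
  · rw [dif_neg h]
    have : holes.drop j = [] := List.drop_eq_nil_of_le (by omega)
    simp [this, pvRl]
termination_by holes.length - j

theorem pvSegsFrom_eq (holes : List (Int × Int)) (i : Nat) (acc : List (List (Int × Int))) :
    pvSegsFrom holes holes.length i acc = acc ++ pvC (holes.drop i) := by
  unfold pvSegsFrom
  by_cases h : i < holes.length
  · rw [dif_pos h]
    have hg : holes.getD i (0, 0) = holes[i] := List.getD_eq_getElem holes (0, 0) h
    have hdrop : holes.drop i = holes[i] :: holes.drop (i + 1) := List.drop_eq_getElem_cons h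
    have hre : pvRunEnd holes holes.length (i + 1)
        = i + 1 + pvRl (holes[i]).2 (holes.drop (i + 1)) := by
      rw [pvRunEnd_eq holes (i + 1)]
      have hj1 : i + 1 - 1 = i := by omega
      rw [hj1, hg]
    set k := pvRl (holes[i]).2 (holes.drop (i + 1)) with hk
    rw [pvSegsFrom_eq holes (pvRunEnd holes holes.length (i + 1)) _, hre]
    have h1 : i + 1 + k - i = 1 + k := by omega
    have h2 : (holes.drop i).take (1 + k) = holes[i] :: (holes.drop (i + 1)).take k := by
      rw [hdrop, Nat.add_comm 1 k, List.take_succ_cons]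
    have h3 : holes.drop (i + 1 + k) = (holes.drop (i + 1)).drop k := by
      rw [List.drop_drop]
    rw [h1, h2, h3]
    conv_rhs => rw [hdrop, pvC_cons]
    simp [← hk]
  · rw [dif_neg h]
    have : holes.drop i = [] := List.drop_eq_nil_of_le (by omega)
    simp [this, pvC_nil]
termination_by holes.length - i
decreasing_by
  have := pvRunEnd_ge holes holes.length (i + 1)
  omega

theorem portB_eq_pvC (holes : List (Int × Int)) :
    divide_row_into_segments_alt holes = pvC holes := by
  unfold divide_row_into_segments_alt
  rw [pvSegsFrom_eq]
  simp

-- ===== VERDICT (by name: the statement is the Claim_ definition above) =====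
theorem divide_row_into_segments_spec : Claim_equal_divide_row_into_segments := by
  intro holes _
  unfold Spec_divide_row_into_segments
  rw [portA_eq_pvC, portB_eq_pvC]
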